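-- pv_equiv track=rewrite | github.com/knowminni/emojify | alphafy.py | F
-- ===== SOURCE A (Python) =====
-- def F(text):
--    res = ''
--    for row in range(0, 7):
--       for col in range(0, 7):
--          if (col == 1 or (row == 0 and col > 1 and col < 6)
--           or (row == 3 and col > 1 and col < 5)):
--             res = res + text
--          else:
--             res = res + '  '
--
--       res = res + '\n'
--
--    return res
-- ===== SOURCE B (Python) =====
-- # B: table-driven — render from a stored 7x7 glyph pattern instead of an inline geometric predicate.
-- PATTERN_F = [
--     " XXXXX ",
--     " X     ",
--     " X     ",
--     " XXXX  ",
--     " X     ",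
--     " X     ",
--     " X     ",
-- ]
--
-- def F(text):
--     return ''.join(
--         ''.join(text if ch == 'X' else '  ' for ch in row) + '\n'
--         for row in PATTERN_F
--     )
-- ===== Notes on version B (the rewrite author's own statement) =====
-- stated objective: simpler
-- what changed: B renders the letter from a stored 7x7 glyph pattern table (joined per-character lookups) instead of A's nested index loops with an inline geometric predicate.
import Mathlib
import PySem

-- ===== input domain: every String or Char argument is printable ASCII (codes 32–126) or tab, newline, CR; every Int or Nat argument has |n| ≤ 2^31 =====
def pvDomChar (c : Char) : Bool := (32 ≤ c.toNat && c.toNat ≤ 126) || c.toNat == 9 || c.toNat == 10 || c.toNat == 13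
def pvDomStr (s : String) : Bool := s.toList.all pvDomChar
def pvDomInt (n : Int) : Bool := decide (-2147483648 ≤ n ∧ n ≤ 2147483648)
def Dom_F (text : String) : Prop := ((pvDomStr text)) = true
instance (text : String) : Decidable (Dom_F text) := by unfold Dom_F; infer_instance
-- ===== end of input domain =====

-- B renders from a stored 7x7 glyph pattern table instead of A's inline geometric predicate (objective: simpler).


-- ===== PORT A =====
def F (text : String) : String :=
  (PySem.List.pyRange 0 7 1).foldl (fun res row =>
    ((PySem.List.pyRange 0 7 1).foldl (fun res col =>
      if col == 1 || (decide (row = 0) && decide (col > 1) && decide (col < 6))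
         || (decide (row = 3) && decide (col > 1) && decide (col < 5))
      then res ++ text
      else res ++ "  ") res) ++ "\n") ""

-- ===== PORT B =====
def patternF : List String :=
  [" XXXXX ", " X     ", " X     ", " XXXX  ", " X     ", " X     ", " X     "]

def F_alt (text : String) : String :=
  String.join (patternF.map (fun row =>
    String.join (row.toList.map (fun ch => if ch == 'X' then text else "  ")) ++ "\n"))

-- ===== PRECONDITION & SPEC =====
def Spec_F (text : String) (out : String) : Prop := out = F_alt text
instance (text : String) (out : String) : Decidable (Spec_F text out) := by unfold Spec_F; infer_instance

-- ===== CLAIM (what is proved, stated in full; the proofs are below) =====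
def Claim_equal_F : Prop := ∀ (text : String), Dom_F text → Spec_F text (F text)

-- ===== LEMMAS AND PROOFS =====

-- ===== VERDICT (by name: the statement is the Claim_ definition above) =====
theorem pyRange07 : PySem.List.pyRange 0 7 1 = [0,1,2,3,4,5,6] := by decide

theorem F_spec : Claim_equal_F := by
  intro text _
  unfold Spec_F F F_alt patternF
  rw [pyRange07]
  simp [String.join, String.append_assoc]
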